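-- pv_equiv track=rewrite | github.com/Laksha10/SoulScribe---Emotion-Aware-Journaling-Web-App | routes/emotion_arc.py | classify_emotion_group
-- ===== SOURCE A (Python) =====
-- from collections import Counter
--
-- POSITIVE_EMOTIONS = {
--     "admiration", "amusement", "approval", "caring", "curiosity",
--     "excitement", "gratitude", "joy", "love", "optimism",
--     "pride", "realization", "relief", "surprise"
-- }
--
-- NEGATIVE_EMOTIONS = {
--     "anger", "annoyance", "confusion", "desire", "disappointment",
--     "disapproval", "disgust", "embarrassment", "fear", "grief",
--     "nervousness", "remorse", "sadness"
-- }
--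
-- def classify_emotion_group(emotions):
--     counts = Counter(emotions)
--     pos = sum(counts[e] for e in POSITIVE_EMOTIONS)
--     neg = sum(counts[e] for e in NEGATIVE_EMOTIONS)
--
--     if pos > neg:
--         return "Positive"
--     elif neg > pos:
--         return "Negative"
--     else:
--         return "Neutral"
-- ===== SOURCE B (Python) =====
-- POSITIVE_EMOTIONS = {
--     "admiration", "amusement", "approval", "caring", "curiosity",
--     "excitement", "gratitude", "joy", "love", "optimism",
--     "pride", "realization", "relief", "surprise"
-- }
--
-- NEGATIVE_EMOTIONS = {
--     "anger", "annoyance", "confusion", "desire", "disappointment",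
--     "disapproval", "disgust", "embarrassment", "fear", "grief",
--     "nervousness", "remorse", "sadness"
-- }
--
-- def classify_emotion_group(emotions):
--     pos = 0
--     neg = 0
--     for e in emotions:
--         if e in POSITIVE_EMOTIONS:
--             pos += 1
--         elif e in NEGATIVE_EMOTIONS:
--             neg += 1
--     if pos > neg:
--         return "Positive"
--     if neg > pos:
--         return "Negative"
--     return "Neutral"
-- ===== Notes on version B (the rewrite author's own statement) =====
-- stated objective: simpler
-- what changed: Replaces Counter plus two set-driven summations with a single accumulating pass over the input that keeps pos/neg tallies directly.
import Mathlib
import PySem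

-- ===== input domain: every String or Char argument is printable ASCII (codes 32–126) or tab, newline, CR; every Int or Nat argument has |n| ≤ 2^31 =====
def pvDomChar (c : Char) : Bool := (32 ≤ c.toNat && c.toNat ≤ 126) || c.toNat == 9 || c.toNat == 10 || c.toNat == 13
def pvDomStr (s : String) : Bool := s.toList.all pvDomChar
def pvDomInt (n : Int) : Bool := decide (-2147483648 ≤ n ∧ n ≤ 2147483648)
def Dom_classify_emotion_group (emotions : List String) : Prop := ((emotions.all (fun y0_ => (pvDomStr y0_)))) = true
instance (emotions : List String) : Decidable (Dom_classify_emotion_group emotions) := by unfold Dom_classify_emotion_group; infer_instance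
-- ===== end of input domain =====

-- B replaces the Counter-then-sum-over-sets structure by one accumulating pass keeping pos/neg tallies (simpler).


-- the two module-level sets, as lists of their distinct elements (set-literal order)
def POSITIVE_EMOTIONS : List String :=
  ["admiration", "amusement", "approval", "caring", "curiosity",
   "excitement", "gratitude", "joy", "love", "optimism",
   "pride", "realization", "relief", "surprise"]

def NEGATIVE_EMOTIONS : List String :=
  ["anger", "annoyance", "confusion", "desire", "disappointment",
   "disapproval", "disgust", "embarrassment", "fear", "grief",
   "nervousness", "remorse", "sadness"]

-- ===== PORT A =====
-- counts = Counter(emotions); pos/neg = sum over the set's elements of counts[e]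
-- (Counter's [] defaults to 0 = getD e 0; sum over a Python set is order-independent, iterated in literal order)
def classify_emotion_group (emotions : List String) : String :=
  let counts : PySem.Dict String Int := PySem.Dict.counter emotions
  let pos : Int := (POSITIVE_EMOTIONS.map (fun e => counts.getD e 0)).sum
  let neg : Int := (NEGATIVE_EMOTIONS.map (fun e => counts.getD e 0)).sum
  if pos > neg then "Positive"
  else if neg > pos then "Negative"
  else "Neutral"

-- ===== PORT B =====
-- single pass: pos/neg accumulators, if/elif on set membership
def classify_emotion_group_alt (emotions : List String) : String :=
  let pn : Int × Int := emotions.foldl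
    (fun (pn : Int × Int) e =>
      if e ∈ POSITIVE_EMOTIONS then (pn.1 + 1, pn.2)
      else if e ∈ NEGATIVE_EMOTIONS then (pn.1, pn.2 + 1)
      else pn)
    (0, 0)
  if pn.1 > pn.2 then "Positive"
  else if pn.2 > pn.1 then "Negative"
  else "Neutral"

-- ===== PRECONDITION & SPEC =====
def Spec_classify_emotion_group (emotions : List String) (out : String) : Prop := out = classify_emotion_group_alt emotions
instance (emotions : List String) (out : String) : Decidable (Spec_classify_emotion_group emotions out) := by unfold Spec_classify_emotion_group; infer_instance

-- ===== CLAIM (what is proved, stated in full; the proofs are below) =====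
def Claim_equal_classify_emotion_group : Prop := ∀ (emotions : List String), Dom_classify_emotion_group emotions → Spec_classify_emotion_group emotions (classify_emotion_group emotions)

-- ===== LEMMAS AND PROOFS =====

-- count of x in a nodup list is 1 or 0 by membership
theorem count_nodup (S : List String) (hS : S.Nodup) (x : String) :
    S.count x = if x ∈ S then 1 else 0 := by
  split_ifs with h
  · exact List.count_eq_one_of_mem hS h
  · exact List.count_eq_zero.mpr h

-- pointwise: adding x to the input raises each count by its indicator
theorem sum_if_eq (S : List String) (x : String) :
    (S.map (fun e => if e = x then (1 : Int) else 0)).sum = (S.count x : Int) := by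
  induction S with
  | nil => simp
  | cons s S ih =>
    simp only [List.map_cons, List.sum_cons, List.count_cons, ih]
    by_cases h : s = x
    · subst h; simp; omega
    · simp [h]

-- A's sum over a nodup list of counts = number of input elements that lie in the list
theorem sum_counts_eq_countP (S : List String) (hS : S.Nodup) (xs : List String) :
    ((S.map (fun e => (xs.count e : Int))).sum) = (xs.countP (fun x => decide (x ∈ S)) : Int) := by
  induction xs with
  | nil => simp
  | cons x xs ih =>
    have hpt : ∀ e : String, ((x :: xs).count e : Int)
        = (xs.count e : Int) + (if e = x then 1 else 0) := by
      intro e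
      rw [List.count_cons]
      rcases eq_or_ne e x with h | h
      · subst h; simp
      · simp [h, Ne.symm h]
    have hstep : (S.map (fun e => ((x :: xs).count e : Int))).sum
        = (S.map (fun e => (xs.count e : Int))).sum + (S.count x : Int) := by
      calc (S.map (fun e => ((x :: xs).count e : Int))).sum
          = (S.map (fun e => (xs.count e : Int) + (if e = x then 1 else 0))).sum := by
            simp only [hpt]
        _ = (S.map (fun e => (xs.count e : Int))).sum
            + (S.map (fun e => if e = x then (1 : Int) else 0)).sum := by
            rw [← List.sum_map_add]
        _ = (S.map (fun e => (xs.count e : Int))).sum + (S.count x : Int) := by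
            rw [sum_if_eq]
    rw [hstep, ih, count_nodup S hS x]
    by_cases h : x ∈ S <;> simp [h]

-- B's fold, characterised
theorem foldB (xs : List String) (p n : Int) :
    xs.foldl
      (fun (pn : Int × Int) e =>
        if e ∈ POSITIVE_EMOTIONS then (pn.1 + 1, pn.2)
        else if e ∈ NEGATIVE_EMOTIONS then (pn.1, pn.2 + 1)
        else pn)
      (p, n)
    = (p + (xs.countP (fun x => decide (x ∈ POSITIVE_EMOTIONS)) : Int),
       n + (xs.countP (fun x => decide (¬ x ∈ POSITIVE_EMOTIONS ∧ x ∈ NEGATIVE_EMOTIONS)) : Int)) := by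
  induction xs generalizing p n with
  | nil => simp
  | cons x xs ih =>
    simp only [List.foldl_cons, List.countP_cons]
    by_cases hp : x ∈ POSITIVE_EMOTIONS
    · simp [hp, ih]; ring
    · by_cases hn : x ∈ NEGATIVE_EMOTIONS
      · simp [hp, hn, ih]; ring
      · simp [hp, hn, ih]

-- the two sets are disjoint
theorem pos_neg_disjoint (x : String) (h : x ∈ NEGATIVE_EMOTIONS) : ¬ x ∈ POSITIVE_EMOTIONS := by
  simp only [NEGATIVE_EMOTIONS, List.mem_cons, List.not_mem_nil, or_false] at h
  rcases h with h|h|h|h|h|h|h|h|h|h|h|h|h <;> subst h <;> decide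

theorem countP_neg_eq (xs : List String) :
    xs.countP (fun x => decide (¬ x ∈ POSITIVE_EMOTIONS ∧ x ∈ NEGATIVE_EMOTIONS))
    = xs.countP (fun x => decide (x ∈ NEGATIVE_EMOTIONS)) := by
  apply List.countP_congr
  intro x _
  by_cases h : x ∈ NEGATIVE_EMOTIONS
  · simp [h, pos_neg_disjoint x h]
  · simp [h]

theorem nodup_pos : POSITIVE_EMOTIONS.Nodup := by decide
theorem nodup_neg : NEGATIVE_EMOTIONS.Nodup := by decide

-- ===== VERDICT (by name: the statement is the Claim_ definition above) =====
theorem classify_emotion_group_spec : Claim_equal_classify_emotion_group := by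
  intro emotions _
  unfold Spec_classify_emotion_group classify_emotion_group classify_emotion_group_alt
  simp only [PySem.Dict.getD_counter, foldB, countP_neg_eq,
    sum_counts_eq_countP POSITIVE_EMOTIONS nodup_pos emotions,
    sum_counts_eq_countP NEGATIVE_EMOTIONS nodup_neg emotions, zero_add]
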